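-- pv_equiv track=rewrite | github.com/jampat000/Fetcher | app/form_helpers.py | _people_credit_types_csv_from_form
-- ===== SOURCE A (Python) =====
-- _PEOPLE_CREDIT_TYPE_FORM_MAP = {
--     "actor": "Actor",
--     "director": "Director",
--     "writer": "Writer",
--     "producer": "Producer",
--     "gueststar": "GuestStar",
-- }
--
-- def _people_credit_types_csv_from_form(form_values: list[str] | None) -> str:
--     credit_vals: list[str] = []
--     for v in form_values or []:
--         key = str(v).strip().lower().replace(" ", "")
--         canon = _PEOPLE_CREDIT_TYPE_FORM_MAP.get(key)
--         if canon:
--             credit_vals.append(canon)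
--     credit_vals = sorted(set(credit_vals))
--     return ",".join(credit_vals) if credit_vals else "Actor"
-- ===== SOURCE B (Python) =====
-- _CANONICAL_IN_ORDER = [
--     ("actor", "Actor"),
--     ("director", "Director"),
--     ("gueststar", "GuestStar"),
--     ("producer", "Producer"),
--     ("writer", "Writer"),
-- ]
--
-- def _people_credit_types_csv_from_form(form_values: list[str] | None) -> str:
--     keys = {str(v).strip().lower().replace(" ", "") for v in form_values or []}
--     out = ",".join(canon for key, canon in _CANONICAL_IN_ORDER if key in keys)
--     return out or "Actor"
-- ===== Notes on version B (the rewrite author's own statement) =====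
-- stated objective: simpler
-- what changed: B builds a set of normalized keys in one pass and then walks a precomputed canonical list already in sorted output order, collecting members, instead of mapping each input through a dict, deduplicating and sorting the results.
import Mathlib
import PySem

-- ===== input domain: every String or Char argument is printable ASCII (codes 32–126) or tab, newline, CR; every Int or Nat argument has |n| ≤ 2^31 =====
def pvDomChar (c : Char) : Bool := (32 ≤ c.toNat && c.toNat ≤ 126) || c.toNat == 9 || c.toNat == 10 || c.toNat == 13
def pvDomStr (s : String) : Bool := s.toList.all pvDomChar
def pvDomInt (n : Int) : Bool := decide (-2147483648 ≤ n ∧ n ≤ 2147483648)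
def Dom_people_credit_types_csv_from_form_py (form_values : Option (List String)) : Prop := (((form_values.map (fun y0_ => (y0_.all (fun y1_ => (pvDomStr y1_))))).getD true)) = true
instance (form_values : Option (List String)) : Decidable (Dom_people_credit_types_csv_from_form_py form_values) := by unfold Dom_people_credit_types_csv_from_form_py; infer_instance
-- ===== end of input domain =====

-- B builds the set of normalized keys once and walks a precomputed canonical list that is
-- already in sorted output order, instead of mapping inputs through a dict then dedup+sorting (objective: simpler).

-- ===== PORT A =====
def pvMapA : PySem.Dict String String := PySem.Dict.ofList
  [("actor","Actor"),("director","Director"),("writer","Writer"),("producer","Producer"),("gueststar","GuestStar")]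

def pvNormA (v : String) : String :=
  PySem.Str.replace (PySem.Str.lower (PySem.Str.strip v)) " " ""

def people_credit_types_csv_from_form_py (form_values : Option (List String)) : String :=
  let credit_vals : List String :=
    (form_values.getD []).foldl (fun acc v =>
      match pvMapA.get? (pvNormA v) with
      | some canon => if canon ≠ "" then acc ++ [canon] else acc   -- `if canon:` truthiness
      | none => acc) []
  let sorted_vals := PySem.List.sorted (PySem.Set.ofList credit_vals) (fun x => x) false
  if sorted_vals ≠ [] then PySem.Str.join "," sorted_vals else "Actor"

-- ===== PORT B =====
def pvCanonicalB : List (String × String) :=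
  [("actor","Actor"),("director","Director"),("gueststar","GuestStar"),("producer","Producer"),("writer","Writer")]

def pvNormB (v : String) : String :=
  PySem.Str.replace (PySem.Str.lower (PySem.Str.strip v)) " " ""

def people_credit_types_csv_from_form_py_alt (form_values : Option (List String)) : String :=
  let keys : PySem.Set String := PySem.Set.ofList ((form_values.getD []).map pvNormB)
  let out := PySem.Str.join ","
    ((pvCanonicalB.filter (fun p => PySem.Set.contains keys p.1)).map (fun p => p.2))
  if out ≠ "" then out else "Actor"

-- ===== PRECONDITION & SPEC =====
def Spec_people_credit_types_csv_from_form_py (form_values : Option (List String)) (out : String) : Prop := out = people_credit_types_csv_from_form_py_alt form_values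
instance (form_values : Option (List String)) (out : String) : Decidable (Spec_people_credit_types_csv_from_form_py form_values out) := by unfold Spec_people_credit_types_csv_from_form_py; infer_instance

-- ===== CLAIM (what is proved, stated in full; the proofs are below) =====
def Claim_equal_people_credit_types_csv_from_form_py : Prop := ∀ (form_values : Option (List String)), Dom_people_credit_types_csv_from_form_py form_values → Spec_people_credit_types_csv_from_form_py form_values (people_credit_types_csv_from_form_py form_values)

-- ===== LEMMAS AND PROOFS =====

-- A's per-element action, as an Option
def pvGA (v : String) : Option String :=
  match pvMapA.get? (pvNormA v) with
  | some c => if c ≠ "" then some c else none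
  | none => none

theorem pv_fold_eq_filterMap (vs : List String) (acc : List String) :
    vs.foldl (fun acc v =>
      match pvMapA.get? (pvNormA v) with
      | some canon => if canon ≠ "" then acc ++ [canon] else acc
      | none => acc) acc = acc ++ vs.filterMap pvGA := by
  induction vs generalizing acc with
  | nil => simp
  | cons v vs ih =>
    rw [List.foldl_cons, List.filterMap_cons]
    cases h : pvMapA.get? (pvNormA v) with
    | none =>
      have hg : pvGA v = none := by rw [pvGA, h]
      rw [hg]
      exact ih acc
    | some c =>
      by_cases hc : c = ""
      · have hg : pvGA v = none := by rw [pvGA, h]; simp [hc]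
        rw [hg]
        simpa [hc] using ih acc
      · have hg : pvGA v = some c := by rw [pvGA, h]; simp [hc]
        rw [hg]
        simp only [ne_eq, hc, not_false_iff, if_true, ih, List.append_assoc, List.singleton_append]

theorem pv_getA (k : String) : pvMapA.get? k =
    if k = "actor" then some "Actor" else if k = "director" then some "Director"
    else if k = "writer" then some "Writer" else if k = "producer" then some "Producer"
    else if k = "gueststar" then some "GuestStar" else none := by
  split_ifs with h1 h2 h3 h4 h5
  · subst h1; rfl
  · subst h2; rfl
  · subst h3; rfl
  · subst h4; rfl
  · subst h5; rfl
  · simp_all [pvMapA, PySem.Dict.ofList, PySem.Dict.update, PySem.Dict.get?_insert,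
      PySem.Dict.get?_empty]

theorem pvGA_eq_some_iff (v c : String) :
    pvGA v = some c ↔ (pvNormA v, c) ∈ pvCanonicalB := by
  rw [pvGA, pv_getA (pvNormA v)]
  generalize pvNormA v = k
  simp only [pvCanonicalB, List.mem_cons, List.not_mem_nil, or_false, Prod.mk.injEq]
  split_ifs <;> (try simp_all) <;> (try exact eq_comm)

theorem pv_canon_snd_pairwise :
    (pvCanonicalB.map (fun p => p.2)).Pairwise (fun a b : String => a < b) := by
  simp [pvCanonicalB]
  refine ⟨⟨?_, ?_, ?_, ?_⟩, ⟨?_, ?_, ?_⟩, ⟨?_, ?_⟩, ?_⟩ <;> decide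

theorem pv_mem_iff (vs : List String) (a : String) :
    a ∈ ((pvCanonicalB.filter
          (fun p => PySem.Set.contains (PySem.Set.ofList (vs.map pvNormB)) p.1)).map (fun p => p.2))
      ↔ a ∈ PySem.Set.ofList (vs.filterMap pvGA) := by
  simp only [List.mem_map, List.mem_filter, PySem.Set.contains_iff, PySem.Set.mem_ofList,
    List.mem_filterMap, List.mem_map]
  constructor
  · rintro ⟨⟨k, c⟩, ⟨hmem, hk⟩, rfl⟩
    obtain ⟨v, hv, hnorm⟩ := hk
    exact ⟨v, hv, by rw [pvGA_eq_some_iff, show pvNormA = pvNormB from rfl, hnorm]; exact hmem⟩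
  · rintro ⟨v, hv, hg⟩
    rw [pvGA_eq_some_iff] at hg
    exact ⟨(pvNormA v, a), ⟨hg, ⟨v, hv, rfl⟩⟩, rfl⟩

theorem pv_main (vs : List String) :
    PySem.List.sorted (PySem.Set.ofList (vs.filterMap pvGA)) (fun x => x) false
      = (pvCanonicalB.filter
          (fun p => PySem.Set.contains (PySem.Set.ofList (vs.map pvNormB)) p.1)).map (fun p => p.2) := by
  apply PySem.List.sorted_eq_of_perm_of_pairwise_lt
  · -- permutation, from Nodup + same membership
    have hsub : ((pvCanonicalB.filter
        (fun p => PySem.Set.contains (PySem.Set.ofList (vs.map pvNormB)) p.1)).map (fun p => p.2)).Sublist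
        (pvCanonicalB.map (fun p => p.2)) := List.filter_sublist.map _
    have hnd : ((pvCanonicalB.filter
        (fun p => PySem.Set.contains (PySem.Set.ofList (vs.map pvNormB)) p.1)).map (fun p => p.2)).Nodup :=
      ((pv_canon_snd_pairwise.imp (fun h => ne_of_lt h)).sublist hsub)
    exact (List.perm_ext_iff_of_nodup hnd (PySem.Set.nodup_ofList _)).2 (pv_mem_iff vs)
  · exact pv_canon_snd_pairwise.sublist (List.filter_sublist.map _)

theorem pv_join_ne_empty (l : List String) (h : l ≠ []) (hall : ∀ s ∈ l, s ≠ "") :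
    PySem.Str.join "," l ≠ "" := by
  match l, h with
  | s :: t, _ =>
    intro heq
    have htl := congrArg String.toList heq
    rw [PySem.Str.toList_join] at htl
    have hs : s.toList ≠ [] := by
      simpa using hall s (List.mem_cons_self ..)
    cases t with
    | nil =>
      rw [List.map_cons, List.map_nil, PySem.Chars.join_singleton] at htl
      exact hs (by simpa using htl)
    | cons b t2 =>
      rw [List.map_cons, List.map_cons, PySem.Chars.join_cons_cons] at htl
      simp only [String.toList_empty, List.append_eq_nil_iff] at htl
      exact hs htl.1.1

theorem pv_final (ys : List String) (hall : ∀ s ∈ ys, s ≠ "") :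
    (if ys ≠ [] then PySem.Str.join "," ys else "Actor")
      = (if PySem.Str.join "," ys ≠ "" then PySem.Str.join "," ys else "Actor") := by
  by_cases h : ys = []
  · subst h
    simp [PySem.Str.join, PySem.Chars.join_nil]
  · rw [if_pos h, if_pos (pv_join_ne_empty ys h hall)]

-- ===== VERDICT (by name: the statement is the Claim_ definition above) =====
theorem people_credit_types_csv_from_form_py_spec : Claim_equal_people_credit_types_csv_from_form_py := by
  intro form_values _
  unfold Spec_people_credit_types_csv_from_form_py
  unfold people_credit_types_csv_from_form_py people_credit_types_csv_from_form_py_alt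
  simp only [pv_fold_eq_filterMap, List.nil_append, pv_main]
  apply pv_final
  intro s hs
  have hs' : s ∈ pvCanonicalB.map (fun p => p.2) :=
    ((List.filter_sublist.map _).subset) hs
  simp only [pvCanonicalB, List.map_cons, List.map_nil, List.mem_cons, List.not_mem_nil, or_false] at hs'
  rcases hs' with rfl | rfl | rfl | rfl | rfl <;> simp
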